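-- pv_equiv track=rewrite | github.com/khaphan-github/prefix-partitioning-based-top-k-frequent-itemset-mining | src/ptf/co_occurrence_numbers.py | _merge_partition_con
-- ===== SOURCE A (Python) =====
-- from typing import Dict, Tuple
--
-- def _merge_partition_con(partition_con_dict):
--     '''
--     input: { prefix: {item: count, ...}, ...
--     output: [ prefix: [(itemset, count), ...]]}
--     '''
--
--     CoN: Dict[int, Tuple[int, int]] = {}
--
--     for prefix, con_i in partition_con_dict.items():
--         for item, count in con_i.items():
--             if item == prefix:
--                 itemset = set([prefix])
--             else:
--                 itemset = set([prefix, item])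
--
--             if prefix not in CoN:
--                 CoN[prefix] = []
--             CoN[prefix].append((itemset, count))
--
--     # Orderrihg each items in descending order of count
--     # x[1] la count
--     for prefix, con_list in CoN.items():
--         con_list.sort(key=lambda x: x[1], reverse=True)
--         CoN[prefix] = con_list
--
--     full_con_list = []
--     for prefix, con_list in CoN.items():
--         full_con_list.extend(con_list)
--     full_con_list.sort(key=lambda x: x[1], reverse=True)
--     return CoN, full_con_list
-- ===== SOURCE B (Python) =====
-- def _merge_partition_con(partition_con_dict):
--     # One stable sort instead of per-prefix sorts plus a final sort:
--     # flatten (prefix, itemset, count) triples, sort that flat list once by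
--     # count descending (stable), then distribute entries back per prefix.
--     CoN = {}
--     flat = []
--     for prefix, con_i in partition_con_dict.items():
--         for item, count in con_i.items():
--             if prefix not in CoN:
--                 CoN[prefix] = []
--             itemset = {prefix} if item == prefix else {prefix, item}
--             flat.append((prefix, (itemset, count)))
--     full = sorted(flat, key=lambda t: t[1][1], reverse=True)
--     for prefix, entry in full:
--         CoN[prefix].append(entry)
--     return CoN, [entry for _, entry in full]
-- ===== Notes on version B (the rewrite author's own statement) =====
-- stated objective: alternative
-- what changed: Replaces A's per-prefix sorts followed by a sort of the concatenation with a single stable sort of the flat (prefix, entry) list, from which the per-prefix lists are distributed back in order; Pre_ excludes association lists with duplicate outer or inner keys, which do not represent the Python dict argument (dict construction collapses duplicates).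
import Mathlib
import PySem

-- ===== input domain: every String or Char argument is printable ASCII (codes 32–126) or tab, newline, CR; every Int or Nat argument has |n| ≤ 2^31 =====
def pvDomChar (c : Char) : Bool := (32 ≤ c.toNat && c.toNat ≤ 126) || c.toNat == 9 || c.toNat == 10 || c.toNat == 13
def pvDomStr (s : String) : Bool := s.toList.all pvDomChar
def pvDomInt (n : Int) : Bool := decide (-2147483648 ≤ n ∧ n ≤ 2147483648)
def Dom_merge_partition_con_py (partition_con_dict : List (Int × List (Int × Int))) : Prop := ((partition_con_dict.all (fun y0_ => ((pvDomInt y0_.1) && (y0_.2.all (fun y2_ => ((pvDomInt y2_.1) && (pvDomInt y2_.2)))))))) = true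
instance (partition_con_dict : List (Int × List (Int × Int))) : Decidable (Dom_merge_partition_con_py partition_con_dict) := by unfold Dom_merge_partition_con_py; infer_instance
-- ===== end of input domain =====

-- B replaces A's per-prefix sorts plus a final sort of the concatenation by ONE stable sort
-- of the flat (prefix, entry) list, distributing the sorted entries back per prefix.

-- set([prefix]) / set([prefix, item]) as its list of distinct elements (item ≠ prefix in the second branch)
def pvItemset (pfx item : Int) : List Int :=
  if item == pfx then [pfx] else [pfx, item]

-- ===== PORT A =====
def merge_partition_con_py (partition_con_dict : List (Int × List (Int × Int))) :
    (List (Int × List (List Int × Int))) × (List (List Int × Int)) :=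
  -- first loop: "if prefix not in CoN: CoN[prefix] = []" followed by CoN[prefix].append(e)
  -- is exactly d.modify prefix [] (· ++ [e])  (d[k] = f(d.get(k, [])))
  let CoN0 : PySem.Dict Int (List (List Int × Int)) :=
    partition_con_dict.foldl (fun d pc =>
      pc.2.foldl (fun d ic =>
        d.modify pc.1 [] (fun l => l ++ [(pvItemset pc.1 ic.1, ic.2)])) d) PySem.Dict.empty
  -- second loop: each value is sorted in place descending by count; the write-back
  -- CoN[prefix] = con_list re-stores the value at its own key, so it maps the items
  let CoN1 : PySem.Dict Int (List (List Int × Int)) :=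
    PySem.Dict.mk (CoN0.items.map (fun pl => (pl.1, PySem.List.sorted pl.2 (fun x => x.2) true)))
  -- third loop: full_con_list.extend(con_list) over CoN.items(), then one final sort
  let full_con_list : List (List Int × Int) :=
    CoN1.items.foldl (fun acc pl => acc ++ pl.2) []
  (CoN1.items, PySem.List.sorted full_con_list (fun x => x.2) true)

-- ===== PORT B =====
def merge_partition_con_py_alt (partition_con_dict : List (Int × List (Int × Int))) :
    (List (Int × List (List Int × Int))) × (List (List Int × Int)) :=
  -- one pass: seed CoN[prefix] = [] (first time only) and build the flat tagged list
  let st :=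
    partition_con_dict.foldl (fun st pc =>
      pc.2.foldl (fun st ic =>
        ((if st.1.contains pc.1 then st.1 else st.1.insert pc.1 []),
         st.2 ++ [(pc.1, (pvItemset pc.1 ic.1, ic.2))])) st)
      ((PySem.Dict.empty : PySem.Dict Int (List (List Int × Int))),
       ([] : List (Int × (List Int × Int))))
  -- single stable sort of the flat list, by count descending
  let full := PySem.List.sorted st.2 (fun t => t.2.2) true
  -- distribute: CoN[prefix].append(entry) in sorted order
  let CoN := full.foldl (fun d t => d.modify t.1 [] (fun l => l ++ [t.2])) st.1
  (CoN.items, full.map (fun t => t.2))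

-- ===== PRECONDITION & SPEC =====
-- Pre_ excludes association lists with duplicate outer or inner dictionary keys: such a
-- list does not represent the Python dict argument (dict construction collapses duplicates).
def Pre_merge_partition_con_py (partition_con_dict : List (Int × List (Int × Int))) : Prop :=
  (partition_con_dict.map (fun pc => pc.1)).Nodup ∧
  ∀ pc ∈ partition_con_dict, (pc.2.map (fun ic => ic.1)).Nodup
instance (partition_con_dict : List (Int × List (Int × Int))) : Decidable (Pre_merge_partition_con_py partition_con_dict) := by unfold Pre_merge_partition_con_py; infer_instance

def pvWitness_merge_partition_con_py : (List (Int × List (Int × Int))) :=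
  [(1, [(1, 2), (2, 1)]), (2, [(3, 5)])]

def Spec_merge_partition_con_py (partition_con_dict : List (Int × List (Int × Int))) (out : (List (Int × List (List Int × Int))) × (List (List Int × Int))) : Prop := out = merge_partition_con_py_alt partition_con_dict
instance (partition_con_dict : List (Int × List (Int × Int))) (out : (List (Int × List (List Int × Int))) × (List (List Int × Int))) : Decidable (Spec_merge_partition_con_py partition_con_dict out) := by unfold Spec_merge_partition_con_py; infer_instance

-- ===== CLAIM =====
def Claim_equal_merge_partition_con_py : Prop := ∀ (partition_con_dict : List (Int × List (Int × Int))), Dom_merge_partition_con_py partition_con_dict → Pre_merge_partition_con_py partition_con_dict → Spec_merge_partition_con_py partition_con_dict (merge_partition_con_py partition_con_dict)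

-- ===== LEMMAS AND PROOFS =====

def pvIns {α : Type} (key : α → Int) (x : α) (acc : List α) : List α :=
  PySem.List.insertBy (fun a b => decide (key b < key a)) x acc

theorem pvIns_nil {α : Type} (key : α → Int) (x : α) : pvIns key x [] = [x] := rfl
theorem pvIns_cons {α : Type} (key : α → Int) (x y : α) (ys : List α) :
    pvIns key x (y :: ys) = if key y < key x then x :: y :: ys else y :: pvIns key x ys := by
  simp [pvIns, PySem.List.insertBy]

theorem pvIns_mem {α : Type} (key : α → Int) (x : α) (acc : List α) (z : α) :
    z ∈ pvIns key x acc ↔ z = x ∨ z ∈ acc := PySem.List.mem_insertBy ..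

theorem pvIns_pairwise {α : Type} (key : α → Int) (x : α) (acc : List α)
    (h : acc.Pairwise (fun a b => key b ≤ key a)) :
    (pvIns key x acc).Pairwise (fun a b => key b ≤ key a) := by
  induction acc with
  | nil => simp [pvIns_nil]
  | cons y ys ih =>
    rw [pvIns_cons]
    rw [List.pairwise_cons] at h
    obtain ⟨hy, hys⟩ := h
    split_ifs with hlt
    · refine List.Pairwise.cons ?_ (List.Pairwise.cons hy hys)
      intro z hz
      rcases List.mem_cons.1 hz with rfl | hz
      · omega
      · have := hy z hz; omega
    · refine List.Pairwise.cons ?_ (ih hys)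
      intro z hz
      rcases (pvIns_mem key x ys z).1 hz with rfl | hz
      · omega
      · exact hy z hz

theorem pvIns_filter {α : Type} (key : α → Int) (x : α) (acc : List α) (c : Int)
    (h : acc.Pairwise (fun a b => key b ≤ key a)) :
    (pvIns key x acc).filter (fun y => key y == c) =
      if key x == c then acc.filter (fun y => key y == c) ++ [x]
      else acc.filter (fun y => key y == c) := by
  induction acc with
  | nil =>
    rw [pvIns_nil]
    by_cases hc : key x = c <;> simp [hc]
  | cons y ys ih =>
    rw [pvIns_cons]
    rw [List.pairwise_cons] at h
    obtain ⟨hy, hys⟩ := h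
    by_cases hlt : key y < key x
    · rw [if_pos hlt]
      by_cases hc : key x = c
      · have hnone : ∀ z, z ∈ (y :: ys) → ¬ ((key z == c) = true) := by
          intro z hz
          simp only [beq_iff_eq]
          rcases List.mem_cons.1 hz with rfl | hz
          · omega
          · have := hy z hz; omega
        rw [List.filter_cons_of_pos (by simp [hc]),
            List.filter_eq_nil_iff.2 hnone]
        simp [hc]
      · rw [List.filter_cons_of_neg (by simpa using hc)]
        simp [hc]
    · rw [if_neg hlt]
      rw [List.filter_cons, List.filter_cons, ih hys]
      by_cases hyc : key y = c <;> by_cases hc : key x = c <;> simp [hyc, hc]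

theorem pvFoldl_ins_filter {α : Type} (key : α → Int) (xs acc : List α) (c : Int)
    (h : acc.Pairwise (fun a b => key b ≤ key a)) :
    (xs.foldl (fun a x => pvIns key x a) acc).filter (fun y => key y == c) =
      acc.filter (fun y => key y == c) ++ xs.filter (fun y => key y == c) := by
  induction xs generalizing acc with
  | nil => simp
  | cons x xs ih =>
    rw [List.foldl_cons, ih _ (pvIns_pairwise key x acc h), pvIns_filter key x acc c h,
      List.filter_cons]
    by_cases hc : key x = c <;> simp [hc]

theorem pvSorted_pairwise {α : Type} (key : α → Int) (xs : List α) :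
    (PySem.List.sorted xs key true).Pairwise (fun a b => key b ≤ key a) :=
  PySem.List.sorted_pairwise_rev xs key

theorem pvSorted_filter_key {α : Type} (key : α → Int) (xs : List α) (c : Int) :
    (PySem.List.sorted xs key true).filter (fun y => key y == c) =
      xs.filter (fun y => key y == c) := by
  rw [PySem.List.sorted_rev_eq_foldl_insertBy]
  have := pvFoldl_ins_filter key xs [] c (by simp)
  simpa [pvIns] using this

theorem pvSorted_uniq {α : Type} (key : α → Int) (ys : List α) : ∀ zs : List α,
    ys.Pairwise (fun a b => key b ≤ key a) →
    zs.Pairwise (fun a b => key b ≤ key a) →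
    (∀ c, ys.filter (fun y => key y == c) = zs.filter (fun y => key y == c)) →
    ys = zs := by
  induction ys with
  | nil =>
    intro zs _ _ hf
    cases zs with
    | nil => rfl
    | cons z zs =>
      have := hf (key z)
      simp at this
  | cons y ys ih =>
    intro zs hy hz hf
    cases zs with
    | nil =>
      have := hf (key y)
      simp at this
    | cons z zs =>
      rw [List.pairwise_cons] at hy hz
      obtain ⟨hyr, hys⟩ := hy
      obtain ⟨hzr, hzs⟩ := hz
      have hkey : key y = key z := by
        by_contra hne
        rcases lt_or_gt_of_ne hne with hlt | hlt
        · have h1 := hf (key z)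
          have : ∀ w, w ∈ (y :: ys) → ¬ ((key w == key z) = true) := by
            intro w hw
            simp only [beq_iff_eq]
            rcases List.mem_cons.1 hw with rfl | hw
            · omega
            · have := hyr w hw; omega
          rw [List.filter_eq_nil_iff.2 this] at h1
          rw [List.filter_cons_of_pos (by simp)] at h1
          exact absurd h1 (by simp)
        · have h1 := hf (key y)
          have : ∀ w, w ∈ (z :: zs) → ¬ ((key w == key y) = true) := by
            intro w hw
            simp only [beq_iff_eq]
            rcases List.mem_cons.1 hw with rfl | hw
            · omega
            · have := hzr w hw; omega
          rw [List.filter_eq_nil_iff.2 this] at h1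
          rw [List.filter_cons_of_pos (by simp)] at h1
          exact absurd h1 (by simp)
      have hhead := hf (key y)
      rw [List.filter_cons_of_pos (by simp), List.filter_cons_of_pos (by simp [hkey])] at hhead
      obtain ⟨hyz, htail⟩ := List.cons.inj hhead
      subst hyz
      refine congrArg (y :: ·) (ih zs hys hzs ?_)
      intro c
      by_cases hc : key y = c
      · subst hc; exact htail
      · have := hf c
        rw [List.filter_cons_of_neg (by simpa using hc),
            List.filter_cons_of_neg (by rw [← hkey]; simpa using hc)] at this
        exact this

theorem pvSorted_char {α : Type} (key : α → Int) (xs zs : List α)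
    (hz : zs.Pairwise (fun a b => key b ≤ key a))
    (hf : ∀ c, zs.filter (fun y => key y == c) = xs.filter (fun y => key y == c)) :
    PySem.List.sorted xs key true = zs := by
  refine pvSorted_uniq key _ zs (pvSorted_pairwise key xs) hz ?_
  intro c
  rw [pvSorted_filter_key, ← hf c]

theorem pvIns_map {α β : Type} (key : α → Int) (k : β → Int) (f : α → β)
    (hk : ∀ a, key a = k (f a)) (x : α) (acc : List α) :
    (pvIns key x acc).map f = pvIns k (f x) (acc.map f) := by
  induction acc with
  | nil => simp [pvIns_nil]
  | cons y ys ih =>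
    rw [pvIns_cons, List.map_cons, pvIns_cons, ← hk, ← hk]
    split_ifs <;> simp [ih]

theorem pvSorted_map {α β : Type} (key : α → Int) (k : β → Int) (f : α → β)
    (hk : ∀ a, key a = k (f a)) (xs : List α) :
    (PySem.List.sorted xs key true).map f = PySem.List.sorted (xs.map f) k true := by
  rw [PySem.List.sorted_rev_eq_foldl_insertBy, PySem.List.sorted_rev_eq_foldl_insertBy]
  have : ∀ acc, (xs.foldl (fun a x => pvIns key x a) acc).map f =
      (xs.map f).foldl (fun a x => pvIns k x a) (acc.map f) := by
    induction xs with
    | nil => intro acc; simp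
    | cons x xs ih =>
      intro acc
      rw [List.foldl_cons, List.map_cons, List.foldl_cons, ih, pvIns_map key k f hk]
  simpa [pvIns] using this []

theorem pvSorted_filter {α : Type} (key : α → Int) (q : α → Bool) (xs : List α) :
    (PySem.List.sorted xs key true).filter q = PySem.List.sorted (xs.filter q) key true := by
  refine (pvSorted_char key (xs.filter q) _ ?_ ?_).symm
  · exact List.Pairwise.sublist List.filter_sublist (pvSorted_pairwise key xs)
  · intro c
    rw [List.filter_comm, pvSorted_filter_key, List.filter_comm]

theorem pvNest {σ' τ δ : Type} (g : Int → σ' → τ) (f : δ → τ → δ)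
    (l : List (Int × List σ')) (init : δ) :
    l.foldl (fun d pc => pc.2.foldl (fun d ic => f d (g pc.1 ic)) d) init =
      (l.flatMap (fun pc => pc.2.map (g pc.1))).foldl f init := by
  induction l generalizing init with
  | nil => rfl
  | cons pc rest ih =>
    rw [List.foldl_cons, List.flatMap_cons, List.foldl_append, List.foldl_map, ih]

theorem pvFoldl_append_singleton {α : Type} (l acc : List α) :
    l.foldl (fun a x => a ++ [x]) acc = acc ++ l := by
  induction l generalizing acc with
  | nil => simp
  | cons x xs ih => rw [List.foldl_cons, ih]; simp

theorem pvSet_update_of_subset (s : PySem.Set Int) (ls : List Int)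
    (h : ∀ x ∈ ls, x ∈ s) : PySem.Set.update s ls = s := by
  induction ls with
  | nil => rfl
  | cons x xs ih =>
    rw [PySem.Set.update_cons, PySem.Set.add_of_mem (h x (by simp))]
    exact ih (fun y hy => h y (by simp [hy]))

theorem pvSet_ofList_const (l : List Int) (p : Int) (hne : l ≠ [])
    (h : ∀ x ∈ l, x = p) : PySem.Set.ofList l = [p] := by
  induction l with
  | nil => exact absurd rfl hne
  | cons x xs ih =>
    have hx : x = p := h x (by simp)
    subst hx
    rw [PySem.Set.ofList_cons]
    cases xs with
    | nil => rfl
    | cons y ys =>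
      have : PySem.Set.ofList (y :: ys) = [x] := ih (by simp) (fun z hz => h z (by simp [hz]))
      rw [this]
      simp [PySem.Set.discard, h]

theorem pvFlatMap_congr {α β : Type} (l : List α) (f g : α → List β)
    (h : ∀ x ∈ l, f x = g x) : l.flatMap f = l.flatMap g := by
  induction l with
  | nil => rfl
  | cons x xs ih =>
    rw [List.flatMap_cons, List.flatMap_cons, h x (by simp),
      ih (fun y hy => h y (by simp [hy]))]

theorem pvGrouping {σ' τ : Type} (g : Int → σ' → τ) (lab : τ → Int)
    (hlab : ∀ p ic, lab (g p ic) = p)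
    (input : List (Int × List σ')) (hnd : (input.map (fun pc => pc.1)).Nodup) :
    (PySem.Set.ofList ((input.flatMap (fun pc => pc.2.map (g pc.1))).map lab)).flatMap
        (fun p => (input.flatMap (fun pc => pc.2.map (g pc.1))).filter (fun t => lab t == p)) =
      input.flatMap (fun pc => pc.2.map (g pc.1)) := by
  induction input with
  | nil => rfl
  | cons pc rest ih =>
    rw [List.map_cons] at hnd
    rw [List.nodup_cons] at hnd
    obtain ⟨hp0, hndr⟩ := hnd
    have hRlab : ∀ t ∈ rest.flatMap (fun pc => pc.2.map (g pc.1)), lab t ∈ rest.map (fun pc => pc.1) := by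
      intro t ht
      rcases List.mem_flatMap.1 ht with ⟨qc, hqc, ht⟩
      rcases List.mem_map.1 ht with ⟨ic, _, rfl⟩
      rw [hlab]
      exact List.mem_map.2 ⟨qc, hqc, rfl⟩
    have hp0R : ∀ t ∈ rest.flatMap (fun pc => pc.2.map (g pc.1)), lab t ≠ pc.1 := by
      intro t ht he
      exact hp0 (he ▸ hRlab t ht)
    rw [List.flatMap_cons]
    cases hB : pc.2.map (g pc.1) with
    | nil =>
      simp only [List.nil_append]
      exact ih hndr
    | cons b bs =>
      have hBlab : ∀ t ∈ pc.2.map (g pc.1), lab t = pc.1 := by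
        intro t ht
        rcases List.mem_map.1 ht with ⟨ic, _, rfl⟩
        exact hlab pc.1 ic
      rw [← hB]
      -- block labels: ofList ((B ++ R).map lab) = pc.1 :: ofList (R.map lab)
      have hK : PySem.Set.ofList ((pc.2.map (g pc.1) ++ rest.flatMap (fun pc => pc.2.map (g pc.1))).map lab)
          = pc.1 :: PySem.Set.ofList ((rest.flatMap (fun pc => pc.2.map (g pc.1))).map lab) := by
        rw [List.map_append, PySem.Set.ofList_append,
          pvSet_ofList_const _ pc.1 (by simp [hB]) (by
            intro x hx
            rcases List.mem_map.1 hx with ⟨t, ht, rfl⟩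
            exact hBlab t ht)]
        rw [PySem.Set.update_eq_append_filter]
        have : (PySem.Set.ofList ((rest.flatMap (fun pc => pc.2.map (g pc.1))).map lab)).filter
            (fun y => !(PySem.Set.contains [pc.1] y)) =
            PySem.Set.ofList ((rest.flatMap (fun pc => pc.2.map (g pc.1))).map lab) := by
          apply List.filter_eq_self.2
          intro y hy
          have hy' := (PySem.Set.mem_ofList ..).1 hy
          rcases List.mem_map.1 hy' with ⟨t, ht, rfl⟩
          have := hp0R t ht
          simp [PySem.Set.contains, this]
        rw [this]
        rfl
      rw [hK, List.flatMap_cons]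
      have h1 : (pc.2.map (g pc.1) ++ rest.flatMap (fun pc => pc.2.map (g pc.1))).filter
          (fun t => lab t == pc.1) = pc.2.map (g pc.1) := by
        rw [List.filter_append, List.filter_eq_self.2 (by
          intro t ht; simpa using hBlab t ht),
          List.filter_eq_nil_iff.2 (by
            intro t ht; simpa using hp0R t ht)]
        simp
      have h2 : (PySem.Set.ofList ((rest.flatMap (fun pc => pc.2.map (g pc.1))).map lab)).flatMap
          (fun p => (pc.2.map (g pc.1) ++ rest.flatMap (fun pc => pc.2.map (g pc.1))).filter (fun t => lab t == p)) =
          (PySem.Set.ofList ((rest.flatMap (fun pc => pc.2.map (g pc.1))).map lab)).flatMap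
          (fun p => (rest.flatMap (fun pc => pc.2.map (g pc.1))).filter (fun t => lab t == p)) := by
        apply pvFlatMap_congr
        intro p hp
        have hpne : p ≠ pc.1 := by
          have hp' := (PySem.Set.mem_ofList ..).1 hp
          rcases List.mem_map.1 hp' with ⟨t, ht, rfl⟩
          exact hp0R t ht
        rw [List.filter_append, List.filter_eq_nil_iff.2 (by
          intro t ht
          have := hBlab t ht
          simp [this, hpne.symm]), List.nil_append]
      rw [h1, h2, ih hndr]

theorem pvFilter_flatMap {α β : Type} (l : List α) (f : α → List β) (q : β → Bool) :
    (l.flatMap f).filter q = l.flatMap (fun x => (f x).filter q) := by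
  induction l with
  | nil => rfl
  | cons x xs ih => rw [List.flatMap_cons, List.flatMap_cons, List.filter_append, ih]

theorem pvSeed_keys (l : List (Int × (List Int × Int)))
    (d : PySem.Dict Int (List (List Int × Int))) :
    (l.foldl (fun d t => if d.contains t.1 then d else d.insert t.1 []) d).keys =
      PySem.Set.update d.keys (l.map (fun t => t.1)) := by
  induction l generalizing d with
  | nil => rfl
  | cons t rest ih =>
    rw [List.foldl_cons, List.map_cons, PySem.Set.update_cons]
    by_cases hc : d.contains t.1
    · rw [if_pos hc, ih,
        PySem.Set.add_of_mem ((PySem.Dict.contains_iff_mem_keys ..).1 hc)]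
    · rw [if_neg hc, ih, PySem.Dict.keys_insert_of_not_contains _ _ (by simpa using hc),
        PySem.Set.add_of_not_mem (fun hm => hc ((PySem.Dict.contains_iff_mem_keys ..).2 hm))]

theorem pvSeed_getD (l : List (Int × (List Int × Int)))
    (d : PySem.Dict Int (List (List Int × Int)))
    (h : ∀ p, d.getD p [] = []) (p : Int) :
    (l.foldl (fun d t => if d.contains t.1 then d else d.insert t.1 []) d).getD p [] = [] := by
  induction l generalizing d with
  | nil => exact h p
  | cons t rest ih =>
    rw [List.foldl_cons]
    by_cases hc : d.contains t.1
    · rw [if_pos hc]; exact ih d h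
    · rw [if_neg hc]
      refine ih _ (fun q => ?_)
      rw [PySem.Dict.getD_insert]
      split_ifs with hq
      · rfl
      · exact h q

def pvFlat (input : List (Int × List (Int × Int))) : List (Int × (List Int × Int)) :=
  input.flatMap (fun pc => pc.2.map (fun ic => (pc.1, (pvItemset pc.1 ic.1, ic.2))))

def pvK (input : List (Int × List (Int × Int))) : List Int :=
  PySem.Set.ofList ((pvFlat input).map (fun t => t.1))

def pvGE (input : List (Int × List (Int × Int))) (p : Int) : List (List Int × Int) :=
  ((pvFlat input).filter (fun t => t.1 == p)).map (fun t => t.2)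

theorem pvA_eq (input : List (Int × List (Int × Int))) :
    merge_partition_con_py input =
      ((pvK input).map (fun p => (p, PySem.List.sorted (pvGE input p) (fun x => x.2) true)),
       PySem.List.sorted
         ((pvK input).flatMap (fun p => PySem.List.sorted (pvGE input p) (fun x => x.2) true))
         (fun x => x.2) true) := by
  unfold merge_partition_con_py
  dsimp only
  have hnest : input.foldl (fun d pc =>
      pc.2.foldl (fun d ic =>
        d.modify pc.1 [] (fun l => l ++ [(pvItemset pc.1 ic.1, ic.2)])) d) PySem.Dict.empty =
      (pvFlat input).foldl (fun d t => d.modify t.1 [] (fun l => l ++ [t.2])) PySem.Dict.empty :=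
    pvNest (fun p ic => (p, (pvItemset p ic.1, ic.2)))
      (fun d t => d.modify t.1 [] (fun l => l ++ [t.2])) input PySem.Dict.empty
  rw [hnest]
  set CoN0 := (pvFlat input).foldl (fun d t => d.modify t.1 [] (fun l => l ++ [t.2]))
      PySem.Dict.empty with hCoN0
  have hkeys : CoN0.keys = pvK input := by
    rw [hCoN0, PySem.Dict.keys_foldl_modify_key (pvFlat input) (fun t => t.1) []
      (fun _ t => (fun l => l ++ [t.2])) PySem.Dict.empty]
    rfl
  have hnd : CoN0.keys.Nodup := by rw [hkeys]; exact PySem.Set.nodup_ofList _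
  have hgetD : ∀ p, CoN0.getD p [] = pvGE input p := by
    intro p
    rw [hCoN0, PySem.Dict.getD_foldl_modify_append]
    simp [pvGE]
  have hitems : CoN0.items = (pvK input).map (fun p => (p, pvGE input p)) := by
    rw [PySem.Dict.items_eq_map_keys CoN0 hnd [], hkeys]
    exact List.map_congr_left (fun p _ => by rw [hgetD])
  rw [hitems]
  rw [List.map_map]
  have hcomp : ((fun pl : Int × List (List Int × Int) =>
        (pl.1, PySem.List.sorted pl.2 (fun x => x.2) true)) ∘
      (fun p => (p, pvGE input p))) =
      fun p => (p, PySem.List.sorted (pvGE input p) (fun x => x.2) true) := rfl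
  rw [hcomp]
  rw [PySem.List.foldl_append_eq_flatMap (fun pl : Int × List (List Int × Int) => pl.2), List.nil_append, List.flatMap_map]

theorem pvB_eq (input : List (Int × List (Int × Int))) :
    merge_partition_con_py_alt input =
      ((pvK input).map (fun p => (p, PySem.List.sorted (pvGE input p) (fun x => x.2) true)),
       PySem.List.sorted ((pvFlat input).map (fun t => t.2)) (fun x => x.2) true) := by
  unfold merge_partition_con_py_alt
  dsimp only
  have hnest : input.foldl (fun st pc =>
      pc.2.foldl (fun st ic =>
        ((if st.1.contains pc.1 then st.1 else st.1.insert pc.1 []),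
         st.2 ++ [(pc.1, (pvItemset pc.1 ic.1, ic.2))])) st)
      ((PySem.Dict.empty : PySem.Dict Int (List (List Int × Int))),
       ([] : List (Int × (List Int × Int)))) =
      (pvFlat input).foldl (fun st t =>
        ((if st.1.contains t.1 then st.1 else st.1.insert t.1 []), st.2 ++ [t]))
        (PySem.Dict.empty, []) :=
    pvNest (fun p ic => (p, (pvItemset p ic.1, ic.2)))
      (fun st t => ((if st.1.contains t.1 then st.1 else st.1.insert t.1 []), st.2 ++ [t]))
      input (PySem.Dict.empty, [])
  rw [hnest]
  rw [PySem.List.foldl_prod_mk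
    (f := fun (d : PySem.Dict Int (List (List Int × Int))) (t : Int × (List Int × Int)) =>
      if d.contains t.1 then d else d.insert t.1 [])
    (g := fun (l : List (Int × (List Int × Int))) (t : Int × (List Int × Int)) => l ++ [t])]
  rw [pvFoldl_append_singleton, List.nil_append]
  set seedD := (pvFlat input).foldl
      (fun d t => if d.contains t.1 then d else d.insert t.1 []) PySem.Dict.empty with hseed
  set full := PySem.List.sorted (pvFlat input) (fun t => t.2.2) true with hfull
  set CoN := full.foldl (fun d t => d.modify t.1 [] (fun l => l ++ [t.2])) seedD with hCoN
  have hskeys : seedD.keys = pvK input := by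
    rw [hseed, pvSeed_keys]
    rfl
  have hkeys : CoN.keys = pvK input := by
    rw [hCoN, PySem.Dict.keys_foldl_modify_key full (fun t => t.1) []
      (fun _ t => (fun l => l ++ [t.2])) seedD, hskeys]
    refine pvSet_update_of_subset _ _ ?_
    intro x hx
    rcases List.mem_map.1 hx with ⟨t, ht, rfl⟩
    have : t ∈ pvFlat input := (PySem.List.mem_sorted ..).1 ht
    exact (PySem.Set.mem_ofList ..).2 (List.mem_map.2 ⟨t, this, rfl⟩)
  have hnd : CoN.keys.Nodup := by rw [hkeys]; exact PySem.Set.nodup_ofList _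
  have hgetD : ∀ p, CoN.getD p [] =
      (full.filter (fun t => t.1 == p)).map (fun t => t.2) := by
    intro p
    rw [hCoN, PySem.Dict.getD_foldl_modify_append,
      pvSeed_getD _ _ (fun q => PySem.Dict.getD_empty ..) p, List.nil_append]
  have hitems : CoN.items = (pvK input).map
      (fun p => (p, (full.filter (fun t => t.1 == p)).map (fun t => t.2))) := by
    rw [PySem.Dict.items_eq_map_keys CoN hnd [], hkeys]
    exact List.map_congr_left (fun p _ => by rw [hgetD])
  rw [hitems]
  refine congrArg₂ Prod.mk ?_ ?_
  · apply List.map_congr_left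
    intro p _
    have h1 : full.filter (fun t => t.1 == p) =
        PySem.List.sorted ((pvFlat input).filter (fun t => t.1 == p)) (fun t => t.2.2) true := by
      rw [hfull, pvSorted_filter]
    rw [h1, pvSorted_map (fun t : Int × (List Int × Int) => t.2.2)
      (fun e : List Int × Int => e.2) (fun t => t.2) (fun a => rfl)]
    rfl
  · rw [hfull]
    exact pvSorted_map (fun t => t.2.2) (fun e => e.2) (fun t => t.2) (fun a => rfl) (pvFlat input)

theorem pvFull_eq (input : List (Int × List (Int × Int)))
    (hnd : (input.map (fun pc => pc.1)).Nodup) :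
    PySem.List.sorted
        ((pvK input).flatMap (fun p => PySem.List.sorted (pvGE input p) (fun x => x.2) true))
        (fun x => x.2) true =
      PySem.List.sorted ((pvFlat input).map (fun t => t.2)) (fun x => x.2) true := by
  refine pvSorted_char (fun x : List Int × Int => x.2) _ _ (pvSorted_pairwise ..) ?_
  intro c
  rw [pvSorted_filter_key]
  have hgroup : (pvK input).flatMap (fun p => (pvFlat input).filter (fun t => t.1 == p)) =
      pvFlat input :=
    pvGrouping (fun p ic => (p, (pvItemset p ic.1, ic.2))) (fun t => t.1)
      (fun _ _ => rfl) input hnd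
  have hx : (pvK input).flatMap (fun p => pvGE input p) = (pvFlat input).map (fun t => t.2) := by
    have : (pvK input).flatMap (fun p => pvGE input p) =
        ((pvK input).flatMap (fun p => (pvFlat input).filter (fun t => t.1 == p))).map
          (fun t => t.2) := by
      rw [List.map_flatMap]
      rfl
    rw [this, hgroup]
  calc ((pvFlat input).map (fun t => t.2)).filter (fun y => y.2 == c)
      = ((pvK input).flatMap (fun p => pvGE input p)).filter (fun y => y.2 == c) := by
        rw [hx]
    _ = (pvK input).flatMap (fun p => (pvGE input p).filter (fun y => y.2 == c)) := by
        rw [pvFilter_flatMap]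
    _ = (pvK input).flatMap (fun p =>
          (PySem.List.sorted (pvGE input p) (fun x => x.2) true).filter (fun y => y.2 == c)) := by
        refine pvFlatMap_congr _ _ _ (fun p _ => ?_)
        rw [pvSorted_filter_key]
    _ = ((pvK input).flatMap
          (fun p => PySem.List.sorted (pvGE input p) (fun x => x.2) true)).filter
          (fun y => y.2 == c) := by
        rw [pvFilter_flatMap]

-- ===== VERDICT (by name: the statement is the Claim_ definition above) =====
theorem merge_partition_con_py_spec : Claim_equal_merge_partition_con_py := by
  intro input _ hpre
  unfold Spec_merge_partition_con_py
  rw [pvA_eq, pvB_eq, pvFull_eq input hpre.1]
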